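-- pv_equiv track=rewrite | github.com/phamnhathuyhuynh-collab/Project-CS | LeetCodeDSA/3803.py | residuePrefixes
-- ===== SOURCE A (Python) =====
-- def residuePrefixes(s):
--     i = 1
--     amount = len(s)
--     if amount == 1:
--         return 1
--     count = 0
--     while i <= amount:
--         if i % 3 == len(set(s[:i])):
--             count += 1
--         i += 1
--     return count
--     return s[:0]
-- ===== SOURCE B (Python) =====
-- def residuePrefixes(s):
--     count = 0
--     seen = set()
--     i = 1
--     for ch in s:
--         seen.add(ch)
--         if i % 3 == len(seen):
--             count += 1
--         i += 1
--     return count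
-- ===== Notes on version B (the rewrite author's own statement) =====
-- stated objective: faster
-- what changed: Single pass maintaining a running set of seen characters instead of rebuilding set(s[:i]) for every prefix.
import Mathlib
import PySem

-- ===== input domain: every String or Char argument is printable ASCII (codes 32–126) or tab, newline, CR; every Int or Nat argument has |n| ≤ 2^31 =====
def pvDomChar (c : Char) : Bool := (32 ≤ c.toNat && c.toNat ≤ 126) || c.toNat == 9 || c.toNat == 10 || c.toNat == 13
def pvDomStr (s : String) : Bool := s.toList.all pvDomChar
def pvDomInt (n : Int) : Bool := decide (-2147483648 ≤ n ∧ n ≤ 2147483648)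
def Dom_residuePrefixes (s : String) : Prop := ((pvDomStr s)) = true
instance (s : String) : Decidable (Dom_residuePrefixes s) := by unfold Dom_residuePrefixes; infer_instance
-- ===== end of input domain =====

-- B replaces A's per-prefix set(s[:i]) rebuild by one pass with a running set of seen characters (objective: faster).

-- ===== PORT A =====
-- while i <= amount: if i % 3 == len(set(s[:i])): count += 1
def residuePrefixes (s : String) : Int :=
  let amount : Int := (s.toList.length : Int)
  if amount = 1 then 1
  else
    (PySem.List.pyRange 1 (amount + 1) 1).foldl
      (fun count i =>
        if PySem.Int.mod i 3 =
            ((PySem.Set.ofList (PySem.List.slice s.toList none (some i))).length : Int)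
        then count + 1 else count) 0

-- ===== PORT B =====
-- for ch in s: seen.add(ch); if i % 3 == len(seen): count += 1; i += 1
def residuePrefixesB_go : List Char → PySem.Set Char → Int → Int → Int
  | [], _, _, count => count
  | c :: rest, seen, i, count =>
    let seen' := PySem.Set.add seen c
    residuePrefixesB_go rest seen' (i + 1)
      (if PySem.Int.mod i 3 = (seen'.length : Int) then count + 1 else count)

def residuePrefixes_alt (s : String) : Int :=
  residuePrefixesB_go s.toList PySem.Set.empty 1 0

-- ===== PRECONDITION & SPEC =====
def Spec_residuePrefixes (s : String) (out : Int) : Prop := out = residuePrefixes_alt s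
instance (s : String) (out : Int) : Decidable (Spec_residuePrefixes s out) := by unfold Spec_residuePrefixes; infer_instance

-- ===== CLAIM (what is proved, stated in full; the proofs are below) =====
def Claim_equal_residuePrefixes : Prop := ∀ (s : String), Dom_residuePrefixes s → Spec_residuePrefixes s (residuePrefixes s)

-- ===== LEMMAS AND PROOFS =====

-- B's loop, started after m processed characters, computes A's fold over the remaining range.
lemma goB_eq (xs : List Char) (m : Nat) (count : Int) (h : m ≤ xs.length) :
    residuePrefixesB_go (xs.drop m) (PySem.Set.ofList (xs.take m)) ((m : Int) + 1) count
      = (PySem.List.pyRange ((m : Int) + 1) ((xs.length : Int) + 1) 1).foldl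
          (fun count i =>
            if PySem.Int.mod i 3 =
                ((PySem.Set.ofList (PySem.List.slice xs none (some i))).length : Int)
            then count + 1 else count) count := by
  induction hfuel : xs.length - m generalizing m count with
  | zero =>
    have hm : m = xs.length := by omega
    subst hm
    rw [List.drop_length, PySem.List.pyRange_one_eq_nil (by omega)]
    simp [residuePrefixesB_go]
  | succ k ih =>
    have hlt : m < xs.length := by omega
    have hdrop : xs.drop m = xs[m] :: xs.drop (m + 1) := List.drop_eq_getElem_cons hlt
    have htake : xs.take (m + 1) = xs.take m ++ [xs[m]] := by
      rw [List.take_add_one]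
      simp [List.getElem?_eq_getElem hlt]
    rw [hdrop, PySem.List.pyRange_one_cons (by exact_mod_cast by omega)]
    simp only [residuePrefixesB_go, List.foldl_cons]
    have hset : PySem.Set.add (PySem.Set.ofList (xs.take m)) xs[m]
        = PySem.Set.ofList (xs.take (m + 1)) := by
      rw [htake, PySem.Set.ofList_append_singleton]
    have hslice : PySem.List.slice xs none (some ((m : Int) + 1)) = xs.take (m + 1) := by
      have : ((m : Int) + 1) = ((m + 1 : Nat) : Int) := by push_cast; ring
      rw [this, PySem.List.slice_to_natCast]
    rw [hset, hslice]
    have := ih (m + 1)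
      (if PySem.Int.mod ((m : Int) + 1) 3 = ((PySem.Set.ofList (xs.take (m + 1))).length : Int)
       then count + 1 else count) (by omega) (by omega)
    simpa [add_assoc, add_comm, add_left_comm] using this

lemma alt_eq_fold (xs : List Char) :
    residuePrefixesB_go xs PySem.Set.empty 1 0
      = (PySem.List.pyRange 1 ((xs.length : Int) + 1) 1).foldl
          (fun count i =>
            if PySem.Int.mod i 3 =
                ((PySem.Set.ofList (PySem.List.slice xs none (some i))).length : Int)
            then count + 1 else count) 0 := by
  have := goB_eq xs 0 0 (by omega)
  simpa [PySem.Set.empty] using this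

-- ===== VERDICT (by name: the statement is the Claim_ definition above) =====
theorem residuePrefixes_spec : Claim_equal_residuePrefixes := by
  intro s _
  unfold Spec_residuePrefixes residuePrefixes residuePrefixes_alt
  rw [alt_eq_fold]
  set xs := s.toList with hxs
  by_cases h1 : (xs.length : Int) = 1
  · have hlen : xs.length = 1 := by exact_mod_cast h1
    obtain ⟨c, hc⟩ := List.length_eq_one_iff.mp hlen
    rw [hc]
    norm_num
    rw [show (PySem.List.pyRange 1 2 1) = [1] by decide]
    simp [PySem.List.slice, PySem.Set.ofList, PySem.Set.add]
  · simp [h1]
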